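-- pv_equiv track=rewrite | github.com/mordecaimaic/cs61a | lab/lab03/lab03.py | get_k_run_starter
-- ===== SOURCE A (Python) =====
-- def get_k_run_starter(n, k):
--     """Returns the 0th digit of the kth increasing run within n.
--     >>> get_k_run_starter(123444345, 0) # example from description
--     3
--     >>> get_k_run_starter(123444345, 1)
--     4
--     >>> get_k_run_starter(123444345, 2)
--     4
--     >>> get_k_run_starter(123444345, 3)
--     1
--     >>> get_k_run_starter(123412341234, 1)
--     1
--     >>> get_k_run_starter(1234234534564567, 0)
--     4
--     >>> get_k_run_starter(1234234534564567, 1)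
--     3
--     >>> get_k_run_starter(1234234534564567, 2)
--     2
--     """
--     i = 0
--     final = None
--     while i <= k:
--         while n > 10:
--             if n % 10 <= n // 10 % 10:
--                 break
--             else:
--                 n = n // 10
--         final = n % 10
--         i = i + 1
--         n = n // 10
--     return final
-- ===== SOURCE B (Python) =====
-- def get_k_run_starter(n, k):
--     """One left-to-right pass over str(n): collect the first digit of each
--     maximal strictly-increasing run, then index the kth run from the right."""
--     s = str(n)
--     starters = [s[0]] + [c for p, c in zip(s, s[1:]) if c <= p]
--     return int(starters[len(starters) - 1 - k]) if k < len(starters) else 0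
-- ===== Notes on version B (the rewrite author's own statement) =====
-- stated objective: faster
-- what changed: A loops k+1 times stripping digits arithmetically (O(d+k)); B builds the list of all run-starter digits in one left-to-right pass over str(n) and indexes the kth run from the right (O(d)), returning 0 when k is past the last run.
-- outside the precondition, e.g. on get_k_run_starter(-5, 0): A returns 5, B raises ValueError; on get_k_run_starter(7, -1): A returns None, B raises IndexError
import Mathlib
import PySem

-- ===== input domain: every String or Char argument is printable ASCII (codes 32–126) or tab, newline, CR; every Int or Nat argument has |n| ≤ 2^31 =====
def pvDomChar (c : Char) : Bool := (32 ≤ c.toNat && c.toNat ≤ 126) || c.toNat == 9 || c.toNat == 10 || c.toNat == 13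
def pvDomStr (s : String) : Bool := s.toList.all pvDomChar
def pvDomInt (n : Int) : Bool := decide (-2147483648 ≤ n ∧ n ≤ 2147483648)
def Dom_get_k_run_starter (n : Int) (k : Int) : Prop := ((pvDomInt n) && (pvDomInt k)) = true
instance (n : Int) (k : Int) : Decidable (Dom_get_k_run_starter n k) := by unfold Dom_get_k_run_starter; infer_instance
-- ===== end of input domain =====

-- B replaces A's per-run arithmetic digit stripping by one left-to-right scan of str(n)
-- collecting all run starters, then indexing the kth run from the right (measured faster: A loops k+1 times, B does one pass).


-- ===== PORT A =====
-- inner 'while n > 10: if n % 10 <= n // 10 % 10: break else: n = n // 10'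
def pvInnerA (n : Int) : Int :=
  if _h : 10 < n then
    if PySem.Int.mod n 10 ≤ PySem.Int.mod (PySem.Int.floordiv n 10) 10 then n
    else pvInnerA (PySem.Int.floordiv n 10)
  else n
termination_by n.toNat
decreasing_by
  have h10 : PySem.Int.floordiv n 10 = n / 10 := PySem.Int.floordiv_eq_ediv_of_pos (by omega)
  have _h1 := Int.mul_ediv_add_emod n 10
  have _h2 := Int.emod_nonneg n (b := 10) (by omega)
  have _h3 := Int.emod_lt_of_pos n (b := 10) (by omega)
  simp only [h10]; omega

-- outer 'while i <= k: <inner>; final = n % 10; i = i + 1; n = n // 10' run (k+1)-times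
def pvLoopA : Nat → Int → Int → Int
  | 0, _n, final => final
  | fuel+1, n, _final =>
      let n' := pvInnerA n
      pvLoopA fuel (PySem.Int.floordiv n' 10) (PySem.Int.mod n' 10)

def get_k_run_starter (n : Int) (k : Int) : Int :=
  -- 'final = None' initially: the 0 placeholder is never returned when k ≥ 0 (Pre_)
  pvLoopA (k + 1).toNat n 0

-- ===== PORT B =====
def get_k_run_starter_alt (n : Int) (k : Int) : Int :=
  let s := PySem.Int.toChars n                                   -- s = str(n)
  -- starters = [s[0]] + [c for p, c in zip(s, s[1:]) if c <= p]
  -- (pyGetD's default is never used: str(n) is nonempty, so s[0] cannot raise)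
  let starters := [PySem.List.pyGetD s 0 ' '] ++
    ((s.zip (PySem.List.slice s (some 1) none)).filter (fun pc => pc.2 ≤ pc.1)).map (fun pc => pc.2)
  -- return int(starters[len(starters) - 1 - k]) if k < len(starters) else 0
  if k < (starters.length : Int) then
    (PySem.Int.ofChars? [PySem.List.pyGetD starters ((starters.length : Int) - 1 - k) ' ']).getD 0
  else 0

-- ===== PRECONDITION & SPEC =====
-- Pre_ excludes k < 0, where A returns None (no int value), and n < 0, where A's returned
-- digits are an artefact of floor arithmetic on negatives and B raises ValueError on int('-').
def Pre_get_k_run_starter (n : Int) (k : Int) : Prop := 0 ≤ n ∧ 0 ≤ k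
instance (n : Int) (k : Int) : Decidable (Pre_get_k_run_starter n k) := by
  unfold Pre_get_k_run_starter; infer_instance

def pvWitness_get_k_run_starter : Int × Int := (123444345, 0)

def Spec_get_k_run_starter (n : Int) (k : Int) (out : Int) : Prop := out = get_k_run_starter_alt n k
instance (n : Int) (k : Int) (out : Int) : Decidable (Spec_get_k_run_starter n k out) := by
  unfold Spec_get_k_run_starter; infer_instance

-- ===== CLAIM (what is proved, stated in full; the proofs are below) =====
def Claim_equal_get_k_run_starter : Prop := ∀ (n : Int) (k : Int), Dom_get_k_run_starter n k → Pre_get_k_run_starter n k → Spec_get_k_run_starter n k (get_k_run_starter n k)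

-- ===== LEMMAS AND PROOFS =====

-- A's inner loop on a natural number
def pvStripN (m : Nat) : Nat :=
  if 10 < m then (if m % 10 ≤ m / 10 % 10 then m else pvStripN (m / 10)) else m
termination_by m
decreasing_by omega

theorem pvStripN_le (m : Nat) : pvStripN m ≤ m := by
  induction m using Nat.strong_induction_on with
  | _ m ih =>
    unfold pvStripN
    split
    · split
      · omega
      · exact le_trans (ih (m / 10) (by omega)) (by omega)
    · omega

theorem pvFd10 (m : Nat) : PySem.Int.floordiv (m : Int) 10 = ((m / 10 : Nat) : Int) := by
  exact_mod_cast PySem.Int.floordiv_natCast m 10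

theorem pvMd10 (m : Nat) : PySem.Int.mod (m : Int) 10 = ((m % 10 : Nat) : Int) := by
  exact_mod_cast PySem.Int.mod_natCast m 10

-- the run-starter digits of m, rightmost run first
def pvRS (m : Nat) : List Nat :=
  let m' := pvStripN m
  m' % 10 :: (if h : m' / 10 = 0 then [] else pvRS (m' / 10))
termination_by m
decreasing_by
  have hle := pvStripN_le m
  omega

theorem pvRS_eq (m : Nat) :
    pvRS m = pvStripN m % 10 ::
      (if pvStripN m / 10 = 0 then [] else pvRS (pvStripN m / 10)) := by
  rw [pvRS, dite_eq_ite]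

theorem pvInnerA_natCast (m : Nat) : pvInnerA (m : Int) = (pvStripN m : Int) := by
  induction m using Nat.strong_induction_on with
  | _ m ih =>
    unfold pvInnerA pvStripN
    by_cases h10 : 10 < m
    · have h10' : (10:Int) < (m:Int) := by exact_mod_cast h10
      rw [dif_pos h10']
      rw [pvFd10 m, pvMd10 m, pvMd10 (m / 10)]
      by_cases hb : m % 10 ≤ m / 10 % 10
      · have hb' : ((m % 10 : Nat) : Int) ≤ ((m / 10 % 10 : Nat) : Int) := by exact_mod_cast hb
        rw [if_pos hb', if_pos h10, if_pos hb]
      · have hb' : ¬ ((m % 10 : Nat) : Int) ≤ ((m / 10 % 10 : Nat) : Int) := by exact_mod_cast hb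
        rw [if_neg hb', if_pos h10, if_neg hb]
        exact ih (m / 10) (by omega)
    · have h10' : ¬ (10:Int) < (m:Int) := by exact_mod_cast h10
      rw [dif_neg h10', if_neg h10]

theorem pvRS_zero : pvRS 0 = [0] := by
  have h : pvStripN 0 = 0 := by unfold pvStripN; simp
  rw [pvRS_eq, h]
  simp

theorem pvLoopA_eq_RS (fuel : Nat) : ∀ (m : Nat) (f : Int),
    pvLoopA (fuel + 1) (m : Int) f = ((pvRS m).getD fuel 0 : Int) := by
  induction fuel with
  | zero =>
    intro m f
    simp only [pvLoopA]
    rw [pvInnerA_natCast, pvMd10, pvRS_eq]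
    simp
  | succ fuel ih =>
    intro m f
    show pvLoopA (fuel + 1) (PySem.Int.floordiv (pvInnerA m) 10) (PySem.Int.mod (pvInnerA m) 10)
        = ((pvRS m).getD (fuel + 1) 0 : Int)
    rw [pvInnerA_natCast, pvFd10, ih (pvStripN m / 10)]
    conv_rhs => rw [pvRS_eq]
    simp only [List.getD_eq_getElem?_getD, List.getElem?_cons_succ]
    by_cases h : pvStripN m / 10 = 0
    · rw [h, pvRS_zero]
      cases fuel <;> simp
    · rw [if_neg h]

-- B's scan on char lists: starters of the tail, given the previous char
def pvRunStartsFwd : Char → List Char → List Char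
  | _, [] => []
  | prev, c :: t => (if c ≤ prev then [c] else []) ++ pvRunStartsFwd c t

def pvStarters : List Char → List Char
  | [] => []
  | c :: t => c :: pvRunStartsFwd c t

theorem pvZip_filter_eq (s : List Char) : ∀ (prev : Char),
    (((prev :: s).zip s).filter (fun pc => pc.2 ≤ pc.1)).map (fun pc => pc.2)
      = pvRunStartsFwd prev s := by
  induction s with
  | nil => intro prev; simp [pvRunStartsFwd]
  | cons c t ih =>
    intro prev
    show (((prev, c) :: (c :: t).zip t).filter _).map _ = _
    rw [pvRunStartsFwd]
    by_cases h : c ≤ prev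
    · simp only [List.filter_cons, h, decide_true, if_pos trivial, List.map_cons, ih c]
      rfl
    · simp only [List.filter_cons]
      simp [h, ih c]

theorem pvRunStartsFwd_append (t : List Char) : ∀ (prev c : Char),
    pvRunStartsFwd prev (t ++ [c])
      = pvRunStartsFwd prev t ++ (if c ≤ (prev :: t).getLast (by simp) then [c] else []) := by
  induction t with
  | nil => intro prev c; simp [pvRunStartsFwd]
  | cons x t ih =>
    intro prev c
    show (if x ≤ prev then [x] else []) ++ pvRunStartsFwd x (t ++ [c]) = _
    rw [ih x]
    simp [pvRunStartsFwd, List.getLast_cons]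

theorem pvStarters_append (s : List Char) (hs : s ≠ []) (c : Char) :
    pvStarters (s ++ [c]) = pvStarters s ++ (if c ≤ s.getLast hs then [c] else []) := by
  cases s with
  | nil => exact absurd rfl hs
  | cons x t =>
    show pvStarters (x :: (t ++ [c])) = _
    rw [pvStarters, pvStarters, pvRunStartsFwd_append t x c]
    simp

theorem pvToDigits_ne_nil (m : Nat) : Nat.toDigits 10 m ≠ [] := by
  rw [Nat.toDigits_eq_if (by omega)]
  split <;> simp

theorem pvToDigits_getLast (m : Nat) (h : Nat.toDigits 10 m ≠ []) :
    (Nat.toDigits 10 m).getLast h = (m % 10).digitChar := by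
  rw [List.getLast_eq_getElem]
  by_cases hm : m < 10
  · simp [Nat.toDigits_of_lt_base hm, Nat.mod_eq_of_lt hm]
  · have := Nat.toDigits_of_base_le (b := 10) (n := m) (by omega) (by omega)
    simp [this]

theorem pvDigitChar_le_iff {d e : Nat} (hd : d < 10) (he : e < 10) :
    d.digitChar ≤ e.digitChar ↔ d ≤ e := by
  interval_cases d <;> interval_cases e <;> simp <;> decide

theorem pvRS_lt_ten (m : Nat) : ∀ d ∈ pvRS m, d < 10 := by
  induction m using Nat.strong_induction_on with
  | _ m ih =>
    rw [pvRS_eq]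
    intro d hd
    rcases List.mem_cons.mp hd with h | h
    · omega
    · by_cases h0 : pvStripN m / 10 = 0
      · rw [if_pos h0] at h; simp at h
      · rw [if_neg h0] at h
        have hle := pvStripN_le m
        exact ih (pvStripN m / 10) (by omega) d h

-- the main bridge: B's left-to-right starters are A's right-to-left starters reversed
theorem pvMain (m : Nat) :
    pvStarters (Nat.toDigits 10 m) = ((pvRS m).map Nat.digitChar).reverse := by
  induction m using Nat.strong_induction_on with
  | _ m ih =>
    by_cases hm : m < 10
    · rw [Nat.toDigits_of_lt_base hm]
      have hs : pvStripN m = m := by unfold pvStripN; rw [if_neg (by omega)]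
      rw [pvRS_eq]
      simp only [hs, Nat.div_eq_of_lt hm]
      simp [pvStarters, pvRunStartsFwd, Nat.mod_eq_of_lt hm]
    · have hq : m / 10 < m := Nat.div_lt_self (by omega) (by omega)
      have hq1 : 0 < m / 10 := Nat.div_pos (by omega) (by omega)
      have hT := Nat.toDigits_of_base_le (b := 10) (n := m) (by omega) (by omega)
      have hne := pvToDigits_ne_nil (m / 10)
      rw [hT, pvStarters_append _ hne, pvToDigits_getLast _ hne, ih _ hq]
      by_cases hb : m % 10 ≤ m / 10 % 10
      · have hc : (m % 10).digitChar ≤ (m / 10 % 10).digitChar :=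
          (pvDigitChar_le_iff (by omega) (by omega)).mpr hb
        rw [if_pos hc]
        have hs : pvStripN m = m := by
          unfold pvStripN
          by_cases h10 : 10 < m
          · rw [if_pos h10, if_pos hb]
          · rw [if_neg h10]
        conv_rhs => rw [pvRS_eq]
        simp only [hs]
        rw [if_neg (by omega)]
        simp
      · have hc : ¬ (m % 10).digitChar ≤ (m / 10 % 10).digitChar := fun h =>
          hb ((pvDigitChar_le_iff (by omega) (by omega)).mp h)
        rw [if_neg hc]
        have h10 : 10 < m := by
          rcases Nat.lt_or_ge 10 m with h | h
          · exact h
          · exfalso; have : m = 10 := by omega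
            subst this; simp at hb
        have hs : pvStripN m = pvStripN (m / 10) := by
          conv_lhs => rw [pvStripN]
          rw [if_pos h10, if_neg hb]
        conv_rhs => rw [pvRS_eq]
        conv_lhs => rw [pvRS_eq]
        simp only [hs]
        simp

theorem pvOfChars_digit (d : Nat) (hd : d < 10) :
    (PySem.Int.ofChars? [d.digitChar]).getD 0 = (d : Int) := by
  interval_cases d <;> decide

theorem pvStarters_head (s : List Char) (hs : s ≠ []) :
    [PySem.List.pyGetD s 0 ' '] ++
      ((s.zip (PySem.List.slice s (some 1) none)).filter (fun pc => pc.2 ≤ pc.1)).map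
        (fun pc => pc.2) = pvStarters s := by
  cases s with
  | nil => exact absurd rfl hs
  | cons c t =>
    rw [PySem.List.slice_from _ (by omega)]
    show [PySem.List.pyGetD (c :: t) ((0:Nat):Int) ' '] ++ _ = _
    rw [PySem.List.pyGetD_natCast]
    simp only [Int.toNat_one, List.drop_succ_cons, List.drop_zero]
    rw [pvZip_filter_eq t c]
    rfl

-- ===== VERDICT (by name: the statement is the Claim_ definition above) =====
theorem get_k_run_starter_spec : Claim_equal_get_k_run_starter := by
  intro n k _hdom hpre
  obtain ⟨hn, hk⟩ := hpre
  unfold Spec_get_k_run_starter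
  -- names for both sides
  obtain ⟨m, rfl⟩ := Int.eq_ofNat_of_zero_le hn
  -- A's side
  have hA : get_k_run_starter (m : Int) k = ((pvRS m).getD k.toNat 0 : Int) := by
    unfold get_k_run_starter
    have : (k + 1).toNat = k.toNat + 1 := by omega
    rw [this, pvLoopA_eq_RS k.toNat m 0]
  -- B's side
  have hsm : PySem.Int.toChars (m : Int) = Nat.toDigits 10 m := by
    unfold PySem.Int.toChars
    rw [if_neg (by omega)]
    norm_num
  have hne : Nat.toDigits 10 m ≠ [] := pvToDigits_ne_nil m
  have hstart := pvStarters_head (Nat.toDigits 10 m) hne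
  have hmain := pvMain m
  rw [hA]
  unfold get_k_run_starter_alt
  simp only [hsm, hstart, hmain]
  have hlen : ((pvRS m).map Nat.digitChar).reverse.length = (pvRS m).length := by simp
  by_cases hkl : k < (((pvRS m).map Nat.digitChar).reverse.length : Int)
  · rw [if_pos hkl]
    rw [hlen] at hkl
    have hkn : k.toNat < (pvRS m).length := by omega
    have hidx : ((((pvRS m).map Nat.digitChar).reverse.length : Int) - 1 - k)
        = (((pvRS m).length - 1 - k.toNat : Nat) : Int) := by
      rw [hlen]; omega
    rw [hidx, PySem.List.pyGetD_natCast]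
    have hlt : (pvRS m).length - 1 - k.toNat < ((pvRS m).map Nat.digitChar).reverse.length := by
      rw [hlen]; omega
    rw [List.getD_eq_getElem _ _ hlt]
    rw [List.getElem_reverse]
    have hidx2 : ((pvRS m).map Nat.digitChar).length - 1 - ((pvRS m).length - 1 - k.toNat)
        = k.toNat := by simp; omega
    simp only [hidx2]
    rw [List.getElem_map]
    rw [pvOfChars_digit _ (pvRS_lt_ten m _ (List.getElem_mem _))]
    rw [List.getD_eq_getElem _ _ hkn]
  · rw [if_neg hkl]
    rw [hlen] at hkl
    have : (pvRS m).length ≤ k.toNat := by omega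
    rw [List.getD_eq_default _ _ this]
    simp
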